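-- pv_equiv track=rewrite | github.com/jarily/HANGMAN-GAME-python | hangman.py | getGuessedWord
-- ===== SOURCE A (Python) =====
-- def getGuessedWord(secretWord, lettersGuessed):
--     '''
--     secretWord: string, the word the user is guessing
--     lettersGuessed: list, what letters have been guessed so far
--     returns: string, comprised of letters and underscores that represents
--       what letters in secretWord have been guessed so far.
--     '''
--     # FILL IN YOUR CODE HERE...
--     ans=''
--     for letter in secretWord:
--         if letter in lettersGuessed:
--             ans+=letter
--         else:
--             ans+='_ '
--     return ans
-- ===== SOURCE B (Python) =====
-- def getGuessedWord(secretWord, lettersGuessed):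
--     '''
--     Positional-buffer re-implementation: start from an all-masked buffer and
--     fill in positions letter by letter over the guesses, then join.
--     '''
--     result = ['_ '] * len(secretWord)
--     for g in lettersGuessed:
--         for i, ch in enumerate(secretWord):
--             if ch == g:
--                 result[i] = ch
--     return ''.join(result)
-- ===== Notes on version B (the rewrite author's own statement) =====
-- stated objective: alternative
-- what changed: Replaces the single pass that appends letter-or-mask to a string accumulator by an inverted traversal: a positional buffer pre-filled with masks, an outer loop over the guessed letters with an inner positional fill, joined at the end.
import Mathlib
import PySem

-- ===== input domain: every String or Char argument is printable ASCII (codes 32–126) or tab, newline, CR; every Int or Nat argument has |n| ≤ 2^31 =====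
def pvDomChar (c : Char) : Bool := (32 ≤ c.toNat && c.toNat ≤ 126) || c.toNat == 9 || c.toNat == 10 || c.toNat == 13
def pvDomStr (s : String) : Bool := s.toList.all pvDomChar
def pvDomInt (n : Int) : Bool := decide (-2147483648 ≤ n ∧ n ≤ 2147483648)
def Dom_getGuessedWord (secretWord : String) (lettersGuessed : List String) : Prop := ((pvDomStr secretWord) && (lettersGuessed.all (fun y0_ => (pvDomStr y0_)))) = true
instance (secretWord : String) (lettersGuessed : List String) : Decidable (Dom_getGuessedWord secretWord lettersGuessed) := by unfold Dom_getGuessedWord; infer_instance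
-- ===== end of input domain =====

-- B replaces A's single append-accumulating pass by an inverted traversal: a positional
-- buffer of masks filled in per guessed letter, then joined (alternative decomposition).


-- ===== PORT A =====
-- ans = ''; for letter in secretWord: ans += letter if letter in lettersGuessed else '_ '
-- (the accumulator is kept on the character-list side; the final String.ofList renders it)
def getGuessedWord (secretWord : String) (lettersGuessed : List String) : String :=
  String.ofList (secretWord.toList.foldl
    (fun ans c =>
      if lettersGuessed.contains (String.ofList [c]) then ans ++ [c] else ans ++ ['_', ' '])
    [])

-- ===== PORT B =====
-- result = ['_ ']*len(secretWord); for g in lettersGuessed: for i,ch in enumerate(secretWord):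
--   if ch == g: result[i] = ch;  return ''.join(result)
def getGuessedWord_alt (secretWord : String) (lettersGuessed : List String) : String :=
  let cs := secretWord.toList
  let res0 : List String := List.replicate cs.length "_ "
  let res := lettersGuessed.foldl
    (fun res g =>
      (PySem.List.enumerate cs 0).foldl
        (fun r p => if String.ofList [p.2] == g then r.set p.1.toNat (String.ofList [p.2]) else r)
        res)
    res0
  PySem.Str.join "" res

-- ===== PRECONDITION & SPEC =====
def Spec_getGuessedWord (secretWord : String) (lettersGuessed : List String) (out : String) : Prop := out = getGuessedWord_alt secretWord lettersGuessed
instance (secretWord : String) (lettersGuessed : List String) (out : String) : Decidable (Spec_getGuessedWord secretWord lettersGuessed out) := by unfold Spec_getGuessedWord; infer_instance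

-- ===== CLAIM (what is proved, stated in full; the proofs are below) =====
def Claim_equal_getGuessedWord : Prop := ∀ (secretWord : String) (lettersGuessed : List String), Dom_getGuessedWord secretWord lettersGuessed → Spec_getGuessedWord secretWord lettersGuessed (getGuessedWord secretWord lettersGuessed)

-- ===== LEMMAS AND PROOFS =====

-- B's inner positional fill, applied to a buffer that is a map over the secret's characters
-- (prefix `pre` already frozen), rewrites the mapped function pointwise.
theorem pv_inner_fill (g : String) (cs : List Char) (pre : List String) (f : Char → String) :
    (PySem.List.enumerate cs (pre.length : Int)).foldl
        (fun r p => if String.ofList [p.2] == g then r.set p.1.toNat (String.ofList [p.2]) else r)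
        (pre ++ cs.map f)
      = pre ++ cs.map (fun c => if String.ofList [c] == g then String.ofList [c] else f c) := by
  induction cs generalizing pre f with
  | nil => simp [PySem.List.enumerate_nil]
  | cons c cs ih =>
    rw [PySem.List.enumerate_cons]
    simp only [List.foldl_cons, List.map_cons]
    by_cases h : String.ofList [c] == g
    · have hset : (pre ++ f c :: cs.map f).set pre.length (String.ofList [c])
          = (pre ++ [String.ofList [c]]) ++ cs.map f := by
        rw [List.set_append_right _ _ (le_refl _)]
        simp
      have := ih (pre ++ [String.ofList [c]]) f
      simp only [List.length_append, List.length_cons, List.length_nil] at this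
      simp only [h, if_pos, Int.toNat_natCast, hset]
      rw [show ((pre.length : Int) + 1) = (((pre.length + 1 : Nat)) : Int) by push_cast; ring]
      simpa [List.append_assoc, h] using this
    · have := ih (pre ++ [f c]) f
      simp only [List.length_append, List.length_cons, List.length_nil] at this
      simp only [h, if_neg, Bool.false_eq_true, not_false_iff]
      rw [show ((pre.length : Int) + 1) = (((pre.length + 1 : Nat)) : Int) by push_cast; ring]
      have hsplit : pre ++ f c :: cs.map f = (pre ++ [f c]) ++ cs.map f := by simp
      rw [hsplit, this]
      simp

-- B's outer fold over the guesses turns the all-mask buffer into the pointwise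
-- letter-or-mask map that A computes.
theorem pv_outer_fill (gs : List String) (cs : List Char) (f : Char → String) :
    gs.foldl
        (fun res g =>
          (PySem.List.enumerate cs 0).foldl
            (fun r p => if String.ofList [p.2] == g then r.set p.1.toNat (String.ofList [p.2]) else r)
            res)
        (cs.map f)
      = cs.map (fun c => if gs.contains (String.ofList [c]) then String.ofList [c] else f c) := by
  induction gs generalizing f with
  | nil => simp
  | cons g gs ih =>
    simp only [List.foldl_cons]
    have h0 := pv_inner_fill g cs [] f
    simp only [List.nil_append, List.length_nil, Nat.cast_zero] at h0
    rw [h0, ih]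
    apply List.map_congr_left
    intro c _
    by_cases h1 : String.ofList [c] = g <;> by_cases h2 : String.ofList [c] ∈ gs <;>
      simp [h1, h2]

-- ''.join on a list of strings is flatten on the character side.
theorem pv_join_toList (parts : List String) :
    (PySem.Str.join "" parts).toList = (parts.map String.toList).flatten := by
  induction parts with
  | nil => simp [PySem.Str.join, PySem.Chars.join_nil]
  | cons p ps ih =>
    cases ps with
    | nil => simp [PySem.Str.join, PySem.Chars.join_singleton]
    | cons q qs =>
      simp only [PySem.Str.join, String.toList_ofList, List.map_cons] at *
      rw [show ("" : String).toList = [] from rfl] at *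
      rw [PySem.Chars.join_cons_cons]
      simp [ih]

-- A's append-accumulating fold is the flatten of a map.
theorem pv_foldl_flatten (cs : List Char) (h : Char → List Char) (acc : List Char) :
    cs.foldl (fun ans c => ans ++ h c) acc = acc ++ (cs.map h).flatten := by
  induction cs generalizing acc with
  | nil => simp
  | cons c cs ih => simp [ih, List.append_assoc]

-- ===== VERDICT (by name: the statement is the Claim_ definition above) =====
theorem getGuessedWord_spec : Claim_equal_getGuessedWord := by
  intro secretWord lettersGuessed _
  unfold Spec_getGuessedWord getGuessedWord getGuessedWord_alt
  simp only
  rw [show (List.replicate secretWord.toList.length "_ ")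
        = secretWord.toList.map (fun _ => "_ ") by simp [List.map_const']]
  rw [pv_outer_fill]
  apply String.toList_injective
  rw [pv_join_toList, List.map_map, String.toList_ofList]
  have hstep : (fun (ans : List Char) c =>
        if lettersGuessed.contains (String.ofList [c]) then ans ++ [c] else ans ++ ['_', ' '])
      = (fun ans c => ans ++ (if lettersGuessed.contains (String.ofList [c]) then [c] else ['_', ' '])) := by
    funext ans c; split <;> rfl
  rw [hstep, pv_foldl_flatten, List.nil_append]
  congr 1
  apply List.map_congr_left
  intro c _
  by_cases h : String.ofList [c] ∈ lettersGuessed <;>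
    simp [h, Function.comp, show ("_ " : String).toList = ['_', ' '] from rfl]
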